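-- pv_equiv track=rewrite | github.com/L1nde/Tehisintellekt | ChatBot/chat_ai.py | separateLocation
-- ===== SOURCE A (Python) =====
-- stopWords = ["", "Mis", "Missugune", "Kuidas", "Kui", "Palju"]
--
-- def separateLocation(strings):
--     locations = []
--     loc = ""
--     for string in strings:
--         if string[0].isupper():
--             loc = " ".join([loc, string])
--         else:
--             if loc.strip() not in stopWords:
--                 locations.append(loc.strip())
--             loc = ""
--     if loc.strip() not in stopWords:
--         locations.append(loc.strip())
--     return locations
-- ===== SOURCE B (Python) =====
-- stopWords = ["", "Mis", "Missugune", "Kuidas", "Kui", "Palju"]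
--
-- def separateLocation(strings):
--     locations = []
--     i = 0
--     n = len(strings)
--     while i < n:
--         if strings[i][0].isupper():
--             j = i + 1
--             while j < n and strings[j][0].isupper():
--                 j += 1
--             loc = " ".join(strings[i:j]).strip()
--             if loc not in stopWords:
--                 locations.append(loc)
--             i = j
--         else:
--             i += 1
--     return locations
-- ===== Notes on version B (the rewrite author's own statement) =====
-- stated objective: alternative
-- what changed: A threads a growing accumulator string through one pass and flushes it on every non-capitalized word; B scans maximal runs of capitalized words with an index (takeWhile/dropWhile in the port), joins each run once and filters it against the stop list, with no threaded accumulator state.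
import Mathlib
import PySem

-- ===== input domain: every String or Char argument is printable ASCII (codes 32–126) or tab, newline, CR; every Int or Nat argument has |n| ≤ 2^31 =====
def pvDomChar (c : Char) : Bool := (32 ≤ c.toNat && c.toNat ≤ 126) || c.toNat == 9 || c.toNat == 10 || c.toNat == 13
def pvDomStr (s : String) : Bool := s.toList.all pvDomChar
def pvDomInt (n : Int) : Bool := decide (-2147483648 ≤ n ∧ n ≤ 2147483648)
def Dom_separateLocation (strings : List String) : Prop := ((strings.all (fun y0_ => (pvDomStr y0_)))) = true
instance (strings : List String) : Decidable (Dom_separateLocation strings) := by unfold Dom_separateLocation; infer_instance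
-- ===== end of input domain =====

-- B replaces A's threaded accumulator (flushed on every non-capitalized word) by a
-- run-scanning traversal: each maximal run of capitalized words is joined once and
-- filtered against the stop list. Alternative decomposition, same cost.

-- ===== PORT A =====
def stopWords : List String := ["", "Mis", "Missugune", "Kuidas", "Kui", "Palju"]

-- one iteration of A's for-loop over state (locations, loc); `none` = string[0] raises (excluded by Pre_)
def sepStepA (st : List String × String) (s : String) : List String × String :=
  match PySem.Str.pyGet? s 0 with
  | some c =>
      if PySem.Chars.isupper c then
        (st.1, PySem.Str.join " " [st.2, s])
      else
        (if PySem.Str.strip st.2 ∈ stopWords then st.1 else st.1 ++ [PySem.Str.strip st.2], "")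
  | none => st

def separateLocation (strings : List String) : List String :=
  let st := strings.foldl sepStepA ([], "")
  if PySem.Str.strip st.2 ∈ stopWords then st.1 else st.1 ++ [PySem.Str.strip st.2]

-- ===== PORT B =====
-- strings[i][0].isupper() (False also stands for the raising case, excluded by Pre_)
def capB (s : String) : Bool :=
  match PySem.Str.pyGet? s 0 with
  | some c => PySem.Chars.isupper c
  | none => false

-- B's outer while-loop: on a capitalized head, the inner while-loop finds the end of
-- the run (takeWhile / dropWhile), the run is joined, stripped and filtered once.
def sepRunsB : List String → List String
  | [] => []
  | s :: rest =>
    if capB s then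
      let loc := PySem.Str.strip (PySem.Str.join " " (s :: rest.takeWhile capB))
      if loc ∈ stopWords then sepRunsB (rest.dropWhile capB)
      else loc :: sepRunsB (rest.dropWhile capB)
    else sepRunsB rest
termination_by l => l.length
decreasing_by
  · have := List.length_dropWhile_le capB rest; simp; omega
  · have := List.length_dropWhile_le capB rest; simp; omega
  · simp

def separateLocation_alt (strings : List String) : List String := sepRunsB strings

-- ===== PRECONDITION & SPEC =====
-- Pre_ excludes lists containing the empty string: there A (and B) raise IndexError on string[0].
def Pre_separateLocation (strings : List String) : Prop := ∀ s ∈ strings, s ≠ ""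
instance (strings : List String) : Decidable (Pre_separateLocation strings) := by
  unfold Pre_separateLocation; infer_instance

def pvWitness_separateLocation : List String := ["Kui", "suur", "on", "Tartu", "Linn", "tana"]

def Spec_separateLocation (strings : List String) (out : List String) : Prop := out = separateLocation_alt strings
instance (strings : List String) (out : List String) : Decidable (Spec_separateLocation strings out) := by unfold Spec_separateLocation; infer_instance

-- ===== CLAIM (what is proved, stated in full; the proofs are below) =====
def Claim_equal_separateLocation : Prop := ∀ (strings : List String), Dom_separateLocation strings → Pre_separateLocation strings → Spec_separateLocation strings (separateLocation strings)

-- ===== LEMMAS AND PROOFS =====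

-- A's join step: loc = " ".join([loc, string])
def joinStepA (l s : String) : String := PySem.Str.join " " [l, s]

-- A's epilogue after the loop
def finA (st : List String × String) : List String :=
  if PySem.Str.strip st.2 ∈ stopWords then st.1 else st.1 ++ [PySem.Str.strip st.2]

theorem sepStepA_cap {s : String} (h : capB s = true) (st : List String × String) :
    sepStepA st s = (st.1, PySem.Str.join " " [st.2, s]) := by
  unfold capB at h
  unfold sepStepA
  cases hg : PySem.Str.pyGet? s 0 with
  | none => rw [hg] at h; simp at h
  | some c =>
      simp only [PySem.Str.pyGet?, PySem.Chars.pyGet?_eq_listPyGet?] at hg h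
      rw [hg] at h
      simp at h
      simp [h]

theorem sepStepA_flush {s : String} (h : capB s = false) (hne : s ≠ "") (st : List String × String) :
    sepStepA st s =
      (if PySem.Str.strip st.2 ∈ stopWords then st.1 else st.1 ++ [PySem.Str.strip st.2], "") := by
  unfold capB at h
  unfold sepStepA
  cases hg : PySem.Str.pyGet? s 0 with
  | none =>
      exfalso
      have hl : s.toList ≠ [] := by
        intro hnil; exact hne (String.toList_inj.mp (by simp [hnil]))
      cases hc : s.toList with
      | nil => exact hl hc
      | cons c cs =>
          have : PySem.Str.pyGet? s 0 = some c := by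
            simp [PySem.Str.pyGet?, hc, PySem.Chars.pyGet?_eq_listPyGet?, PySem.List.pyGet?,
              PySem.List.pyIdx?]
          rw [this] at hg; cases hg
  | some c =>
      simp only [PySem.Str.pyGet?, PySem.Chars.pyGet?_eq_listPyGet?] at hg h
      rw [hg] at h
      simp at h
      simp [h]

-- the loop over a capitalized run only grows loc
theorem foldl_run (run : List String) :
    ∀ (t : List String) (acc : List String) (l : String),
      (∀ s ∈ run, capB s = true) →
      (run ++ t).foldl sepStepA (acc, l) = t.foldl sepStepA (acc, run.foldl joinStepA l) := by
  induction run with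
  | nil => intro t acc l _; simp
  | cons w ws ih =>
      intro t acc l hcap
      have hw : capB w = true := hcap w (by simp)
      simp only [List.cons_append, List.foldl_cons]
      rw [sepStepA_cap hw]
      exact ih t acc (joinStepA l w) (fun s hs => hcap s (by simp [hs]))

-- gluing lemma for " ".join
theorem join_glue (sep a b : List Char) (tail : List (List Char)) :
    PySem.Chars.join sep ((a ++ sep ++ b) :: tail) = PySem.Chars.join sep (a :: b :: tail) := by
  cases tail with
  | nil => simp [PySem.Chars.join_singleton, PySem.Chars.join_cons_cons]
  | cons t ts =>
      simp only [PySem.Chars.join_cons_cons]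
      simp [List.append_assoc]

-- A's accumulated loc is " ".join(l :: ws), character-wise
theorem toList_foldl_joinStepA (ws : List String) :
    ∀ l : String,
      (ws.foldl joinStepA l).toList = PySem.Chars.join [' '] (l.toList :: ws.map String.toList) := by
  induction ws with
  | nil => intro l; simp [PySem.Chars.join_singleton]
  | cons w ws ih =>
      intro l
      simp only [List.foldl_cons, List.map_cons]
      rw [ih (joinStepA l w)]
      have hj : (joinStepA l w).toList = l.toList ++ [' '] ++ w.toList := by
        simp [joinStepA, PySem.Str.join, PySem.Chars.join_cons_cons, PySem.Chars.join_singleton]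
      rw [hj, join_glue]

theorem strip_space_cons (cs : List Char) :
    PySem.Chars.strip (' ' :: cs) = PySem.Chars.strip cs := by
  simp [PySem.Chars.strip, PySem.Chars.lstrip,
    show PySem.Chars.isspace ' ' = true from rfl]

-- stripping A's loc (which starts with the artificial " ") gives B's stripped join
theorem emit_eq (w : String) (ws : List String) :
    PySem.Str.strip ((w :: ws).foldl joinStepA "") =
      PySem.Str.strip (PySem.Str.join " " (w :: ws)) := by
  apply String.toList_inj.mp
  have h1 : ((w :: ws).foldl joinStepA "").toList =
      PySem.Chars.join [' '] ([] :: (w :: ws).map String.toList) := by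
    simpa using toList_foldl_joinStepA (w :: ws) ""
  have h2 : PySem.Chars.join [' '] ([] :: (w :: ws).map String.toList) =
      ' ' :: PySem.Chars.join [' '] ((w :: ws).map String.toList) := by
    rw [List.map_cons, PySem.Chars.join_cons_cons]; simp
  simp only [PySem.Str.strip, String.toList_ofList, h1, h2, strip_space_cons, PySem.Str.join,
    show (" " : String).toList = [' '] from rfl]

theorem strip_empty_mem : PySem.Str.strip "" ∈ stopWords := by decide

-- main invariant: running A's loop from a flushed state (loc = "") and finishing with
-- A's epilogue produces acc ++ (B's runs of the remaining input)
theorem mainL :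
    ∀ (n : Nat) (rest : List String) (acc : List String),
      rest.length ≤ n → (∀ s ∈ rest, s ≠ "") →
      finA (rest.foldl sepStepA (acc, "")) = acc ++ sepRunsB rest := by
  intro n
  induction n with
  | zero =>
      intro rest acc hlen _
      have : rest = [] := List.eq_nil_of_length_eq_zero (Nat.le_zero.mp hlen)
      subst this
      simp [finA, sepRunsB, strip_empty_mem]
  | succ n ih =>
      intro rest acc hlen hne
      cases rest with
      | nil => simp [finA, sepRunsB, strip_empty_mem]
      | cons s r =>
          by_cases hcap : capB s = true
          · -- a capitalized run starts
            have hsplit : r.takeWhile capB ++ r.dropWhile capB = r :=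
              List.takeWhile_append_dropWhile
            set run := r.takeWhile capB with hrun
            set rest' := r.dropWhile capB with hrest'
            have hruncap : ∀ x ∈ run, capB x = true := fun x hx => List.mem_takeWhile_imp hx
            have hfold :
                (s :: r).foldl sepStepA (acc, "") =
                  rest'.foldl sepStepA (acc, (s :: run).foldl joinStepA "") := by
              conv_lhs => rw [← hsplit]
              rw [show (s :: (run ++ rest')) = (s :: run) ++ rest' by simp]
              exact foldl_run (s :: run) rest' acc ""
                (by intro x hx; rcases List.mem_cons.mp hx with h | h
                    · subst h; exact hcap
                    · exact hruncap x h)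
            set L := (s :: run).foldl joinStepA "" with hL
            set E := PySem.Str.strip L with hE
            have hEB : E = PySem.Str.strip (PySem.Str.join " " (s :: run)) := by
              rw [hE, hL]; exact emit_eq s run
            have hBnil : sepRunsB [] = [] := by rw [sepRunsB]
            have hB : sepRunsB (s :: r) =
                (if E ∈ stopWords then [] else [E]) ++ sepRunsB rest' := by
              rw [sepRunsB, if_pos hcap, ← hrun, ← hrest', ← hEB]
              split <;> simp_all
            cases hrc : rest' with
            | nil =>
                rw [hfold, hrc]
                simp only [List.foldl_nil, finA]
                rw [hB, hrc, hBnil]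
                split <;> simp_all
            | cons u t' =>
                have hu : capB u = false := by
                  have := List.head_dropWhile_not capB (l := r) (by rw [← hrest', hrc]; simp)
                  simpa [← hrest', hrc] using this
                have hune : u ≠ "" := by
                  apply hne
                  have : u ∈ rest' := by rw [hrc]; simp
                  exact List.mem_cons_of_mem s ((List.dropWhile_sublist capB).mem this)
                have hstep : sepStepA (acc, L) u =
                    (if E ∈ stopWords then acc else acc ++ [E], "") := by
                  rw [sepStepA_flush hu hune, hE]
                have ht'len : t'.length ≤ n := by
                  have h1 : rest'.length ≤ r.length := List.length_dropWhile_le capB r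
                  have h2 : (s :: r).length ≤ n + 1 := hlen
                  simp [hrc] at h1
                  simp at h2
                  omega
                have ht'ne : ∀ x ∈ t', x ≠ "" := by
                  intro x hx
                  apply hne
                  have : x ∈ rest' := by rw [hrc]; simp [hx]
                  exact List.mem_cons_of_mem s ((List.dropWhile_sublist capB).mem this)
                have hBt : sepRunsB (u :: t') = sepRunsB t' := by
                  rw [sepRunsB, if_neg (by simp [hu])]
                rw [hfold, hrc, List.foldl_cons, hstep,
                  ih t' (if E ∈ stopWords then acc else acc ++ [E]) ht'len ht'ne,
                  hB, hrc, hBt]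
                split <;> simp_all
          · -- non-capitalized head: A flushes the empty loc (a no-op), B skips it
            have hcap' : capB s = false := by simpa using hcap
            have hsne : s ≠ "" := hne s (by simp)
            have hstep : sepStepA (acc, "") s = (acc, "") := by
              rw [sepStepA_flush hcap' hsne]
              simp [strip_empty_mem]
            have hB : sepRunsB (s :: r) = sepRunsB r := by
              rw [sepRunsB, if_neg (by simp [hcap'])]
            simp only [List.foldl_cons, hstep, hB]
            exact ih r acc (by simpa using Nat.le_of_succ_le_succ hlen)
              (fun x hx => hne x (by simp [hx]))

-- ===== VERDICT (by name: the statement is the Claim_ definition above) =====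
theorem separateLocation_spec : Claim_equal_separateLocation := by
  intro strings _ hpre
  unfold Spec_separateLocation separateLocation separateLocation_alt
  have := mainL strings.length strings [] (le_refl _) hpre
  simpa [finA] using this
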